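-- pv_equiv track=rewrite | github.com/ioaksenenko/neural_networks | release/datamaker/main.py | single_choice_question_generate
-- ===== SOURCE A (Python) =====
-- def single_choice_question_generate(n=1):
--     inputs = []
--     outputs = []
--     for i in range(n):
--         input = '<p>_</p>'
--         output = [[4], [4], [4], [1], [4], [4], [4], [4]]
--         for j in range(n):
--             input += '<p>' + str(j+1) + '.' + ('=' if i == j else '~') + '_;</p>'
--             output += [[4], [4], [4]]
--             for _ in str(j+1):
--                 output += [[3]]
--             output += [[3], [2, j + 5], [2, j + 5], [3], [4], [4], [4], [4]]
--         input += '<p>_</p>'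
--         output += [[4], [4], [4], [1], [4], [4], [4], [4]]
--         inputs.append(input)
--         outputs.append(output)
--     return inputs, outputs
-- ===== SOURCE B (Python) =====
-- def single_choice_question_generate(n=1):
--     # Precompute the n '~'-style input fragments once; the output row is loop-invariant
--     # (it never depends on i), so build it exactly once and hand each row a fresh copy.
--     frags = ['<p>' + str(j + 1) + '.~_;</p>' for j in range(n)]
--     block = [[4], [4], [4], [1], [4], [4], [4], [4]]
--     row = list(block)
--     for j in range(n):
--         row += [[4], [4], [4]] + [[3] for _ in str(j + 1)] \
--                + [[3], [2, j + 5], [2, j + 5], [3], [4], [4], [4], [4]]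
--     row += block
--     inputs = ['<p>_</p>'
--               + ''.join(frags[:i])
--               + '<p>' + str(i + 1) + '.=_;</p>'
--               + ''.join(frags[i + 1:])
--               + '<p>_</p>'
--               for i in range(n)]
--     outputs = [[list(cell) for cell in row] for _ in range(n)]
--     return inputs, outputs
-- ===== Notes on version B (the rewrite author's own statement) =====
-- stated objective: simpler
-- what changed: B builds the loop-invariant output row exactly once (A rebuilds it inside every outer iteration) and assembles each input line by joining precomputed '~'-fragments around the one rebuilt '='-fragment, instead of A's interleaved double loop.
import Mathlib
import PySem

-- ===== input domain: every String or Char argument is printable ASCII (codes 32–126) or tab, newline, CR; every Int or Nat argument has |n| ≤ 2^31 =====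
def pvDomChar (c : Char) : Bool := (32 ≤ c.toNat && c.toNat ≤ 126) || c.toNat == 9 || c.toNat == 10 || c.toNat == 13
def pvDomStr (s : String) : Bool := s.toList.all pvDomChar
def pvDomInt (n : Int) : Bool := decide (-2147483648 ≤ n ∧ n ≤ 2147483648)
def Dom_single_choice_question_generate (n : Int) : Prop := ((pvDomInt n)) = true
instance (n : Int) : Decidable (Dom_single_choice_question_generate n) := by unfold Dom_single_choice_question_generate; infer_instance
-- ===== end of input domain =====

-- B builds the loop-invariant output row once and assembles each input from precomputed
-- '~'-fragments with joins over slices, instead of A's per-i interleaved double loop (objective: simpler).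

-- ===== PORT A =====
-- literal transliteration of A: outer loop over i, inner loop over j threading the
-- (input, output) pair, innermost character loop over str(j+1) appending [[3]] per char
def single_choice_question_generate (n : Int) : List String × List (List (List Int)) :=
  (PySem.List.pyRange 0 n).foldl
    (fun (st : List String × List (List (List Int))) (i : Int) =>
      let inner :=
        (PySem.List.pyRange 0 n).foldl
          (fun (p : String × List (List Int)) (j : Int) =>
            (p.1 ++ "<p>" ++ PySem.Int.toStr (j + 1) ++ "." ++ (if i == j then "=" else "~") ++ "_;</p>",
             ((PySem.Int.toChars (j + 1)).foldl (fun o _ => o ++ [[3]])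
                (p.2 ++ [[4], [4], [4]]))
               ++ [[3], [2, j + 5], [2, j + 5], [3], [4], [4], [4], [4]]))
          ("<p>_</p>", [[4], [4], [4], [1], [4], [4], [4], [4]])
      (st.1 ++ [inner.1 ++ "<p>_</p>"],
       st.2 ++ [inner.2 ++ [[4], [4], [4], [1], [4], [4], [4], [4]]]))
    ([], [])

-- ===== PORT B =====
-- fragment j of the input line, written with '~' (Source B's frags[j])
def bFrag (j : Int) : String := "<p>" ++ PySem.Int.toStr (j + 1) ++ ".~_;</p>"

def single_choice_question_generate_alt (n : Int) : List String × List (List (List Int)) :=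
  let frags := (PySem.List.pyRange 0 n).map bFrag
  let block : List (List Int) := [[4], [4], [4], [1], [4], [4], [4], [4]]
  let row :=
    (PySem.List.pyRange 0 n).foldl
      (fun (r : List (List Int)) (j : Int) =>
        r ++ ([[4], [4], [4]] ++ (PySem.Int.toChars (j + 1)).map (fun _ => ([3] : List Int))
              ++ [[3], [2, j + 5], [2, j + 5], [3], [4], [4], [4], [4]]))
      block
  let row := row ++ block
  let inputs :=
    (PySem.List.pyRange 0 n).map (fun i =>
      "<p>_</p>" ++ PySem.Str.join "" (PySem.List.slice frags none (some i))
        ++ "<p>" ++ PySem.Int.toStr (i + 1) ++ ".=_;</p>"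
        ++ PySem.Str.join "" (PySem.List.slice frags (some (i + 1)) none)
        ++ "<p>_</p>")
  let outputs := (PySem.List.pyRange 0 n).map (fun _ => row.map (fun cell => cell))
  (inputs, outputs)

-- ===== PRECONDITION & SPEC =====
def Spec_single_choice_question_generate (n : Int) (out : List String × List (List (List Int))) : Prop := out = single_choice_question_generate_alt n
instance (n : Int) (out : List String × List (List (List Int))) : Decidable (Spec_single_choice_question_generate n out) := by unfold Spec_single_choice_question_generate; infer_instance

-- ===== CLAIM (what is proved, stated in full; the proofs are below) =====
def Claim_equal_single_choice_question_generate : Prop := ∀ (n : Int), Dom_single_choice_question_generate n → Spec_single_choice_question_generate n (single_choice_question_generate n)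

-- ===== LEMMAS AND PROOFS =====

-- A's inner fragment string, right-associated
def frA (i j : Int) : String :=
  "<p>" ++ (PySem.Int.toStr (j + 1) ++ ("." ++ ((if i == j then "=" else "~") ++ "_;</p>")))

-- the common per-j output chunk
def chunk (j : Int) : List (List Int) :=
  [[4], [4], [4]] ++ (PySem.Int.toChars (j + 1)).map (fun _ => ([3] : List Int))
    ++ [[3], [2, j + 5], [2, j + 5], [3], [4], [4], [4], [4]]

def blk : List (List Int) := [[4], [4], [4], [1], [4], [4], [4], [4]]

-- the common output row
def rowRef (n : Int) : List (List Int) :=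
  (PySem.List.pyRange 0 n).foldl (fun r j => r ++ chunk j) blk ++ blk

-- generic loop-shape lemmas
theorem foldl_pair_append {α β ι : Type} (f : ι → α) (g : ι → β) (l : List ι)
    (xs : List α) (ys : List β) :
    l.foldl (fun st i => (st.1 ++ [f i], st.2 ++ [g i])) (xs, ys)
      = (xs ++ l.map f, ys ++ l.map g) := by
  induction l generalizing xs ys with
  | nil => simp
  | cons x t ih => simp [ih]

theorem foldl_pair_split {α β ι : Type} (f : α → ι → α) (g : β → ι → β) (l : List ι)
    (a : α) (b : β) :
    l.foldl (fun p j => (f p.1 j, g p.2 j)) (a, b) = (l.foldl f a, l.foldl g b) := by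
  induction l generalizing a b with
  | nil => rfl
  | cons x t ih => simp [ih]

theorem join_empty_nil : PySem.Str.join "" [] = "" := by decide

theorem join_empty_cons (s : String) (l : List String) :
    PySem.Str.join "" (s :: l) = s ++ PySem.Str.join "" l := by
  cases l with
  | nil =>
    simp [PySem.Str.join, PySem.Chars.join]
    apply String.toList_inj.mp
    simp [List.intercalate]
  | cons t ts =>
    simp [PySem.Str.join, PySem.Chars.join]
    apply String.toList_inj.mp
    simp [List.intercalate, List.intersperse]

theorem join_empty_append (l1 l2 : List String) :
    PySem.Str.join "" (l1 ++ l2) = PySem.Str.join "" l1 ++ PySem.Str.join "" l2 := by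
  induction l1 with
  | nil => simp [join_empty_nil]
  | cons x t ih => simp [join_empty_cons, ih, String.append_assoc]

theorem str_foldl_append (f : Int → String) (l : List Int) (a : String) :
    l.foldl (fun s j => s ++ f j) a = a ++ PySem.Str.join "" (l.map f) := by
  induction l generalizing a with
  | nil => simp [join_empty_nil]
  | cons x t ih => simp [ih, join_empty_cons, String.append_assoc]

theorem frA_of_ne (i j : Int) (h : i ≠ j) : frA i j = bFrag j := by
  have hb : (i == j) = false := beq_eq_false_iff_ne.mpr h
  simp [frA, bFrag, hb]
  apply String.toList_inj.mp
  simp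

theorem frA_self (i : Int) :
    frA i i = "<p>" ++ PySem.Int.toStr (i + 1) ++ ".=_;</p>" := by
  simp [frA]
  apply String.toList_inj.mp
  simp [String.append_assoc]

-- A's value in reference form
theorem A_char (n : Int) :
    single_choice_question_generate n
      = ((PySem.List.pyRange 0 n).map (fun i =>
            (PySem.List.pyRange 0 n).foldl (fun s j => s ++ frA i j) "<p>_</p>" ++ "<p>_</p>"),
         (PySem.List.pyRange 0 n).map (fun _ => rowRef n)) := by
  unfold single_choice_question_generate
  have hstep : ∀ i : Int,
      (fun (p : String × List (List Int)) (j : Int) =>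
        (p.1 ++ "<p>" ++ PySem.Int.toStr (j + 1) ++ "." ++ (if i == j then "=" else "~") ++ "_;</p>",
         ((PySem.Int.toChars (j + 1)).foldl (fun o _ => o ++ [[3]])
            (p.2 ++ [[4], [4], [4]]))
           ++ [[3], [2, j + 5], [2, j + 5], [3], [4], [4], [4], [4]]))
      = fun p j => (p.1 ++ frA i j, p.2 ++ chunk j) := by
    intro i; funext p j
    refine Prod.ext ?_ ?_
    · simp [frA, String.append_assoc]
    · rw [PySem.List.foldl_append_singleton_eq_map (fun _ => ([3] : List Int))]
      simp [chunk]
  have hsplit : ∀ i : Int,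
      (PySem.List.pyRange 0 n).foldl (fun (p : String × List (List Int)) j => (p.1 ++ frA i j, p.2 ++ chunk j))
        ("<p>_</p>", [[4], [4], [4], [1], [4], [4], [4], [4]])
      = ((PySem.List.pyRange 0 n).foldl (fun s j => s ++ frA i j) "<p>_</p>",
         (PySem.List.pyRange 0 n).foldl (fun r j => r ++ chunk j) [[4], [4], [4], [1], [4], [4], [4], [4]]) :=
    fun i => foldl_pair_split (fun s j => s ++ frA i j) (fun r j => r ++ chunk j) _ _ _
  simp only [hstep, hsplit]
  rw [foldl_pair_append (fun i => (PySem.List.pyRange 0 n).foldl (fun s j => s ++ frA i j) "<p>_</p>" ++ "<p>_</p>")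
        (fun _ => (PySem.List.pyRange 0 n).foldl (fun r j => r ++ chunk j) [[4], [4], [4], [1], [4], [4], [4], [4]] ++ [[4], [4], [4], [1], [4], [4], [4], [4]])]
  simp [rowRef, blk]

-- B's value in reference form
theorem B_char (n : Int) :
    single_choice_question_generate_alt n
      = ((PySem.List.pyRange 0 n).map (fun i =>
          "<p>_</p>" ++ PySem.Str.join "" (PySem.List.slice ((PySem.List.pyRange 0 n).map bFrag) none (some i))
            ++ "<p>" ++ PySem.Int.toStr (i + 1) ++ ".=_;</p>"
            ++ PySem.Str.join "" (PySem.List.slice ((PySem.List.pyRange 0 n).map bFrag) (some (i + 1)) none)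
            ++ "<p>_</p>"),
         (PySem.List.pyRange 0 n).map (fun _ => rowRef n)) := by
  unfold single_choice_question_generate_alt
  simp only [List.map_id']
  rfl

-- per-i input strings agree
theorem input_eq (n i : Int) (h0 : 0 ≤ i) (h1 : i < n) :
    (PySem.List.pyRange 0 n).foldl (fun s j => s ++ frA i j) "<p>_</p>" ++ "<p>_</p>"
      = "<p>_</p>" ++ PySem.Str.join "" (PySem.List.slice ((PySem.List.pyRange 0 n).map bFrag) none (some i))
          ++ "<p>" ++ PySem.Int.toStr (i + 1) ++ ".=_;</p>"
          ++ PySem.Str.join "" (PySem.List.slice ((PySem.List.pyRange 0 n).map bFrag) (some (i + 1)) none)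
          ++ "<p>_</p>" := by
  have hsplit1 : PySem.List.pyRange 0 n = PySem.List.pyRange 0 i ++ PySem.List.pyRange i n :=
    PySem.List.pyRange_one_append 0 i n h0 (le_of_lt h1)
  have hcons : PySem.List.pyRange i n = i :: PySem.List.pyRange (i + 1) n :=
    PySem.List.pyRange_one_cons h1
  have hsplit2 : PySem.List.pyRange 0 n = PySem.List.pyRange 0 (i + 1) ++ PySem.List.pyRange (i + 1) n :=
    PySem.List.pyRange_one_append 0 (i + 1) n (by omega) (by omega)
  have hlen1 : ((PySem.List.pyRange 0 i).map bFrag).length = i.toNat := by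
    simp [PySem.List.length_pyRange_one]
  have hlen2 : ((PySem.List.pyRange 0 (i + 1)).map bFrag).length = (i + 1).toNat := by
    simp [PySem.List.length_pyRange_one]
  have htake : PySem.List.slice ((PySem.List.pyRange 0 n).map bFrag) none (some i)
      = (PySem.List.pyRange 0 i).map bFrag := by
    rw [PySem.List.slice_to _ h0, hsplit1, List.map_append, List.take_left' hlen1]
  have hdrop : PySem.List.slice ((PySem.List.pyRange 0 n).map bFrag) (some (i + 1)) none
      = (PySem.List.pyRange (i + 1) n).map bFrag := by
    rw [PySem.List.slice_from _ (by omega), hsplit2, List.map_append, List.drop_left' hlen2]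
  have hm1 : (PySem.List.pyRange 0 i).map (frA i) = (PySem.List.pyRange 0 i).map bFrag := by
    refine List.map_congr_left ?_
    intro j hj
    exact frA_of_ne i j (by have := PySem.List.mem_pyRange_one.mp hj; omega)
  have hm2 : (PySem.List.pyRange (i + 1) n).map (frA i) = (PySem.List.pyRange (i + 1) n).map bFrag := by
    refine List.map_congr_left ?_
    intro j hj
    exact frA_of_ne i j (by have := PySem.List.mem_pyRange_one.mp hj; omega)
  rw [htake, hdrop, str_foldl_append, hsplit1, hcons]
  simp only [List.map_append, List.map_cons, join_empty_append, join_empty_cons, hm1, hm2, frA_self]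
  simp [String.append_assoc]

-- ===== VERDICT (by name: the statement is the Claim_ definition above) =====
theorem single_choice_question_generate_spec : Claim_equal_single_choice_question_generate := by
  intro n _
  unfold Spec_single_choice_question_generate
  rw [A_char, B_char]
  refine Prod.ext ?_ rfl
  refine List.map_congr_left ?_
  intro i hi
  have h := (PySem.List.mem_pyRange_one).mp hi
  exact input_eq n i h.1 h.2
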